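-- pv_equiv track=rewrite | github.com/Bricesodini/transcript_whisper | transcribe-suite/src/rag_export/text_processing.py | _sentence_case
-- ===== SOURCE A (Python) =====
-- from typing import Iterable, List, Sequence
--
-- def _sentence_case(text: str) -> str:
--     result: List[str] = []
--     capitalize_next = True
--     for ch in text:
--         if capitalize_next and ch.isalpha():
--             result.append(ch.upper())
--             capitalize_next = False
--             continue
--         result.append(ch)
--         if ch in ".!?":
--             capitalize_next = True
--         elif ch.strip():
--             capitalize_next = False
--     return "".join(result)
-- ===== SOURCE B (Python) =====
-- def _cap_first(piece):
--     # capitalize the first non-whitespace character of the piece if it is alphabetic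
--     for i, ch in enumerate(piece):
--         if ch.strip():
--             if ch.isalpha():
--                 return piece[:i] + [ch.upper()] + piece[i + 1:]
--             return piece
--     return piece
--
-- def _sentence_case(text: str) -> str:
--     # split into pieces, each ending at a sentence terminator; capitalize each piece's head
--     pieces = []
--     buf = []
--     for ch in text:
--         buf.append(ch)
--         if ch in ".!?":
--             pieces.append(buf)
--             buf = []
--     pieces.append(buf)
--     return "".join("".join(_cap_first(p)) for p in pieces)
-- ===== Notes on version B (the rewrite author's own statement) =====
-- stated objective: alternative
-- what changed: Replaces A's single character loop threading a capitalize_next boolean through every character by a two-phase decomposition: split the text into pieces ending at each sentence terminator, then independently capitalize the first non-whitespace character of each piece if it is alphabetic.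
import Mathlib
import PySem

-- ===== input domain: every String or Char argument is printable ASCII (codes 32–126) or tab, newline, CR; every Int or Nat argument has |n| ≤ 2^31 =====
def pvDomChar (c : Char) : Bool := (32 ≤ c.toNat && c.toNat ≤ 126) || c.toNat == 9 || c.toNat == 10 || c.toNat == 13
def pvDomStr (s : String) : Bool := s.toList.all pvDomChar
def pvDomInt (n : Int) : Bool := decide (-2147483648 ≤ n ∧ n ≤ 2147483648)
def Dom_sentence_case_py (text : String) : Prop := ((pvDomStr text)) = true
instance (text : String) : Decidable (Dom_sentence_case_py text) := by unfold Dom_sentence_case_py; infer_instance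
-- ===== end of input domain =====

-- B replaces A's single stateful character loop by a split-into-sentence-pieces pass plus a
-- capitalize-first-letter pass per piece (objective: simpler decomposition, same cost).

-- ===== PORT A =====
-- the for-loop of A: state = capitalize_next; result built char by char
def pvAGo : List Char → Bool → List Char
  | [], _ => []
  | c :: rest, cap =>
    if cap && PySem.Chars.isalpha c then
      PySem.Chars.upperChar c :: pvAGo rest false
    else
      c :: pvAGo rest
        (if c == '.' || c == '!' || c == '?' then true
         else if !(PySem.Chars.strip [c]).isEmpty then false
         else cap)

def sentence_case_py (text : String) : String :=
  String.ofList (pvAGo text.toList true)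

-- ===== PORT B =====
-- _cap_first: scan past leading whitespace, uppercase the first char if alphabetic
def pvCapFirst : List Char → List Char
  | [] => []
  | c :: rest =>
    if !(PySem.Chars.strip [c]).isEmpty then
      if PySem.Chars.isalpha c then PySem.Chars.upperChar c :: rest
      else c :: rest
    else c :: pvCapFirst rest

-- the split loop of B: buf accumulates the current piece, terminators close a piece
def pvSplit : List Char → List Char → List (List Char)
  | [], buf => [buf]
  | c :: rest, buf =>
    if c == '.' || c == '!' || c == '?' then
      (buf ++ [c]) :: pvSplit rest []
    else
      pvSplit rest (buf ++ [c])

def sentence_case_py_alt (text : String) : String :=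
  String.ofList (((pvSplit text.toList []).map pvCapFirst).flatten)

-- ===== PRECONDITION & SPEC =====
def Spec_sentence_case_py (text : String) (out : String) : Prop := out = sentence_case_py_alt text
instance (text : String) (out : String) : Decidable (Spec_sentence_case_py text out) := by unfold Spec_sentence_case_py; infer_instance

-- ===== CLAIM (what is proved, stated in full; the proofs are below) =====
def Claim_equal_sentence_case_py : Prop := ∀ (text : String), Dom_sentence_case_py text → Spec_sentence_case_py text (sentence_case_py text)

-- ===== LEMMAS AND PROOFS =====

-- first piece and remaining pieces of B's split
def pvFstP (l : List Char) : List Char := (pvSplit l []).headI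
def pvRestP (l : List Char) : List (List Char) := (pvSplit l []).tail

lemma pvStrip_singleton (c : Char) :
    (PySem.Chars.strip [c]).isEmpty = PySem.Chars.isspace c := by
  by_cases h : PySem.Chars.isspace c = true
  · simp [PySem.Chars.strip, PySem.Chars.lstrip, PySem.Chars.rstrip, h]
  · simp [PySem.Chars.strip, PySem.Chars.lstrip, PySem.Chars.rstrip, h]

lemma pvAlpha_not_space (c : Char) (h : PySem.Chars.isalpha c = true) :
    PySem.Chars.isspace c = false := by
  unfold PySem.Chars.isalpha PySem.Chars.isupper PySem.Chars.islower at h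
  simp only [decide_eq_true_eq, Bool.and_eq_true, Bool.or_eq_true] at h
  have h' : 65 ≤ c.toNat ∧ c.toNat ≤ 90 ∨ 97 ≤ c.toNat ∧ c.toNat ≤ 122 := h
  unfold PySem.Chars.isspace
  simp only [Bool.or_eq_false_iff, Bool.and_eq_false_iff, decide_eq_false_iff_not]
  omega

lemma pvTerm_not_alpha (c : Char) (h : (c == '.' || c == '!' || c == '?') = true) :
    PySem.Chars.isalpha c = false := by
  simp only [Bool.or_eq_true, beq_iff_eq] at h
  rcases h with (h | h) | h <;> subst h <;> decide

lemma pvTerm_not_space (c : Char) (h : (c == '.' || c == '!' || c == '?') = true) :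
    PySem.Chars.isspace c = false := by
  simp only [Bool.or_eq_true, beq_iff_eq] at h
  rcases h with (h | h) | h <;> subst h <;> decide

lemma pvSplit_buf : ∀ (l : List Char) (b : List Char),
    pvSplit l b = (b ++ pvFstP l) :: pvRestP l := by
  intro l
  induction l with
  | nil => intro b; simp [pvSplit, pvFstP, pvRestP]
  | cons c rest ih =>
    intro b
    by_cases h : (c == '.' || c == '!' || c == '?') = true
    · simp [pvSplit, h, pvFstP, pvRestP]
    · have hb := ih (b ++ [c])
      have h0 := ih [c]
      have hF : pvFstP (c :: rest) = c :: pvFstP rest := by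
        simp [pvFstP, pvSplit, h, h0]
      have hR : pvRestP (c :: rest) = pvRestP rest := by
        simp [pvRestP, pvSplit, h, h0]
      simp [pvSplit, h, hb, hF, hR]

lemma pvMain : ∀ l : List Char,
    pvAGo l true = ((pvSplit l []).map pvCapFirst).flatten ∧
    pvAGo l false = pvFstP l ++ ((pvRestP l).map pvCapFirst).flatten := by
  intro l
  induction l with
  | nil => constructor <;> simp [pvAGo, pvSplit, pvCapFirst, pvFstP, pvRestP]
  | cons c rest ih =>
    obtain ⟨iT, iF⟩ := ih
    have hsplit0 : pvSplit rest [] = pvFstP rest :: pvRestP rest := by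
      simpa using pvSplit_buf rest []
    by_cases hterm : (c == '.' || c == '!' || c == '?') = true
    · -- terminator: closes a piece, state becomes true
      have ha := pvTerm_not_alpha c hterm
      have hs := pvTerm_not_space c hterm
      have hF : pvFstP (c :: rest) = [c] := by simp [pvFstP, pvSplit, hterm]
      have hR : pvRestP (c :: rest) = pvSplit rest [] := by
        simp [pvRestP, pvSplit, hterm]
      constructor
      · simp [pvAGo, pvSplit, hterm, ha, hs, pvStrip_singleton, pvCapFirst, iT]
      · simp [pvAGo, hterm, ha, iT, hF, hR]
    · have hsplit := pvSplit_buf rest [c]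
      have hF : pvFstP (c :: rest) = c :: pvFstP rest := by
        simp [pvFstP, pvSplit, hterm, hsplit]
      have hR : pvRestP (c :: rest) = pvRestP rest := by
        simp [pvRestP, pvSplit, hterm, hsplit]
      by_cases hsp : PySem.Chars.isspace c = true
      · -- whitespace: state unchanged
        have ha : PySem.Chars.isalpha c = false := by
          rcases Bool.eq_false_or_eq_true (PySem.Chars.isalpha c) with h' | h'
          · rw [pvAlpha_not_space c h'] at hsp; cases hsp
          · exact h'
        constructor
        · simp [pvAGo, pvSplit, hterm, ha, hsp, pvStrip_singleton, hsplit,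
            pvCapFirst, iT, hsplit0]
        · simp [pvAGo, hterm, ha, hsp, pvStrip_singleton, iF, hF, hR]
      · by_cases halpha : PySem.Chars.isalpha c = true
        · -- alphabetic: capitalized when cap=true, then state false
          constructor
          · simp [pvAGo, pvSplit, hterm, halpha, hsp, pvStrip_singleton, hsplit,
              pvCapFirst, iF]
          · simp [pvAGo, hterm, halpha, hsp, pvStrip_singleton, iF, hF, hR]
        · -- other printable char: state becomes false
          constructor
          · simp [pvAGo, pvSplit, hterm, halpha, hsp, pvStrip_singleton, hsplit,
              pvCapFirst, iF]
          · simp [pvAGo, hterm, halpha, hsp, pvStrip_singleton, iF, hF, hR]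

-- ===== VERDICT (by name: the statement is the Claim_ definition above) =====
theorem sentence_case_py_spec : Claim_equal_sentence_case_py := by
  intro text _
  unfold Spec_sentence_case_py sentence_case_py sentence_case_py_alt
  exact congrArg String.ofList (pvMain text.toList).1
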